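-- pv_equiv track=rewrite | github.com/ThiagoAbrigo/user-management-backend | app/controllers/usercontroller.py | _is_sequential
-- ===== SOURCE A (Python) =====
-- def _is_sequential(number_str):
--     """
--     Verifica si un número es secuencial (ej: 1234567890, 0987654321).
--     Retorna True si es secuencial, False si es válido.
--     """
--     # Patrones secuenciales comunes
--     sequential_patterns = [
--         "1234567890",
--         "0987654321",
--         "0123456789",
--         "9876543210",
--         "1111111111",
--         "2222222222",
--         "3333333333",
--         "4444444444",
--         "5555555555",
--         "6666666666",
--         "7777777777",
--         "8888888888",
--         "9999999999",
--     ]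
--
--     if number_str in sequential_patterns:
--         return True
--
--     # Verificar si todos los dígitos son iguales
--     if len(set(number_str)) == 1:
--         return True
--
--     # Verificar secuencia ascendente o descendente
--     is_ascending = all(
--         int(number_str[i]) == int(number_str[i - 1]) + 1
--         for i in range(1, len(number_str))
--     )
--     is_descending = all(
--         int(number_str[i]) == int(number_str[i - 1]) - 1
--         for i in range(1, len(number_str))
--     )
--
--     return is_ascending or is_descending
-- ===== SOURCE B (Python) =====
-- # B: no digit arithmetic at all — an ascending-by-1 digit run is exactly a contiguous
-- # substring of the 10-character ascending digit master string (descending runs: of the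
-- # reversed one), so the two all() comparison scans become two substring-membership tests.
-- # Pre_ excludes exactly the inputs where A raises ValueError (non-uniform strings whose
-- # digit prefix carries one of A's lazy scans into a non-digit char); B returns False there.
-- def _is_sequential(number_str):
--     sequential_patterns = [
--         "1234567890",
--         "0987654321",
--         "0123456789",
--         "9876543210",
--         "1111111111",
--         "2222222222",
--         "3333333333",
--         "4444444444",
--         "5555555555",
--         "6666666666",
--         "7777777777",
--         "8888888888",
--         "9999999999",
--     ]
--     return (number_str in sequential_patterns
--             or len(set(number_str)) == 1
--             or number_str in "0123456789"
--             or number_str in "9876543210")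
-- ===== Notes on version B (the rewrite author's own statement) =====
-- stated objective: simpler
-- what changed: Replaces A's two index-driven all() scans of int() comparisons by two substring tests: an ascending (resp. descending) consecutive digit run is exactly a contiguous substring of the 10-character ascending (resp. descending) digit master string, so B does no digit arithmetic at all.
import Mathlib
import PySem

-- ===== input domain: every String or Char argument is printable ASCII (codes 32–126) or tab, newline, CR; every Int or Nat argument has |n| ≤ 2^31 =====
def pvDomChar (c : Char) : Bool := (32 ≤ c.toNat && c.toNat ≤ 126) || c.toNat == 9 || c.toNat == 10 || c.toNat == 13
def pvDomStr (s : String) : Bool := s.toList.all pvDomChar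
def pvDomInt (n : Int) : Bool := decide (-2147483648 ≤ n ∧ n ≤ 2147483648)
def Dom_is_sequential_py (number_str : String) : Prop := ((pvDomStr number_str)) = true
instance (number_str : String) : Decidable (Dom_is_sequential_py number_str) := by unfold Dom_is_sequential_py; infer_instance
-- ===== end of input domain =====

-- B drops A's two index-driven all() scans of int() comparisons: an ascending (resp.
-- descending) consecutive digit run is exactly a contiguous substring of the ascending
-- (resp. descending) 10-digit master string, so B is two substring tests (objective: simpler).

-- int(c) for a single character c, ported as code − 48: exact on digit characters; Pre_
-- guarantees every comparison that decides the returned value is between digit characters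
-- (elsewhere Python's lazy scans raise ValueError — outside Pre_).
def pvDigitInt (c : Char) : Int := (c.toNat : Int) - 48

-- ===== PORT A =====
def is_sequential_py (number_str : String) : Bool :=
  let sequential_patterns : List String :=
    ["1234567890", "0987654321", "0123456789", "9876543210",
     "1111111111", "2222222222", "3333333333", "4444444444", "5555555555",
     "6666666666", "7777777777", "8888888888", "9999999999"]
  if sequential_patterns.contains number_str then true
  else if (PySem.Set.ofList number_str.toList).length == 1 then true
  else
    let cs := number_str.toList
    let n : Int := cs.length
    let is_ascending := (PySem.List.pyRange 1 n 1).all (fun i =>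
      pvDigitInt (PySem.List.pyGetD cs i ' ') == pvDigitInt (PySem.List.pyGetD cs (i - 1) ' ') + 1)
    let is_descending := (PySem.List.pyRange 1 n 1).all (fun i =>
      pvDigitInt (PySem.List.pyGetD cs i ' ') == pvDigitInt (PySem.List.pyGetD cs (i - 1) ' ') - 1)
    is_ascending || is_descending

-- ===== PORT B =====
def is_sequential_py_alt (number_str : String) : Bool :=
  let sequential_patterns : List String :=
    ["1234567890", "0987654321", "0123456789", "9876543210",
     "1111111111", "2222222222", "3333333333", "4444444444", "5555555555",
     "6666666666", "7777777777", "8888888888", "9999999999"]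
  sequential_patterns.contains number_str
  || (PySem.Set.ofList number_str.toList).length == 1
  || PySem.Str.isIn number_str "0123456789"
  || PySem.Str.isIn number_str "9876543210"

-- ===== PRECONDITION & SPEC =====
def pvIsDigit (c : Char) : Bool := 48 ≤ c.toNat && c.toNat ≤ 57

-- Pre_ admits exactly the inputs on which the Python A returns: all-digit strings, strings
-- with a single distinct character, and strings whose leading digit prefix makes BOTH of
-- A's lazy scans fail on a digit-vs-digit comparison (so both short-circuit before any
-- int() of a non-digit character); on every other input A raises ValueError.
def Pre_is_sequential_py (number_str : String) : Prop :=
  (number_str.toList.all pvIsDigit = true) ∨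
  (PySem.Set.ofList number_str.toList).length = 1 ∨
  (((number_str.toList.takeWhile pvIsDigit).zip (number_str.toList.takeWhile pvIsDigit).tail).any
      (fun p => !(p.2.toNat == p.1.toNat + 1)) = true ∧
   ((number_str.toList.takeWhile pvIsDigit).zip (number_str.toList.takeWhile pvIsDigit).tail).any
      (fun p => !(p.1.toNat == p.2.toNat + 1)) = true)
instance (number_str : String) : Decidable (Pre_is_sequential_py number_str) := by
  unfold Pre_is_sequential_py; infer_instance

def pvWitness_is_sequential_py : String := "4567"

def Spec_is_sequential_py (number_str : String) (out : Bool) : Prop := out = is_sequential_py_alt number_str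
instance (number_str : String) (out : Bool) : Decidable (Spec_is_sequential_py number_str out) := by unfold Spec_is_sequential_py; infer_instance

-- ===== CLAIM (what is proved, stated in full; the proofs are below) =====
def Claim_equal_is_sequential_py : Prop := ∀ (number_str : String), Dom_is_sequential_py number_str → Pre_is_sequential_py number_str → Spec_is_sequential_py number_str (is_sequential_py number_str)

-- ===== LEMMAS AND PROOFS =====

def pvMasterAsc : List Char := ['0','1','2','3','4','5','6','7','8','9']
def pvMasterDesc : List Char := ['9','8','7','6','5','4','3','2','1','0']

theorem pvMasterAsc_get (k : Nat) (h : k < pvMasterAsc.length) : pvMasterAsc[k].toNat = 48 + k := by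
  have hk : k < 10 := by simpa [pvMasterAsc] using h
  interval_cases k <;> rfl

theorem pvMasterDesc_get (k : Nat) (h : k < pvMasterDesc.length) : pvMasterDesc[k].toNat = 57 - k := by
  have hk : k < 10 := by simpa [pvMasterDesc] using h
  interval_cases k <;> rfl

theorem pvChar_eq_of_toNat {a b : Char} (h : a.toNat = b.toNat) : a = b := by
  apply Char.ext
  exact UInt32.toNat_inj.mp h

-- the index-based all() over range(1, len) equals the all over zip(cs, cs.tail)
theorem pv_all_range_eq_zip (cs : List Char) (P : Char → Char → Bool) :
    (PySem.List.pyRange 1 (cs.length : Int) 1).all (fun i =>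
      P (PySem.List.pyGetD cs i ' ') (PySem.List.pyGetD cs (i - 1) ' ')) =
    (cs.zip cs.tail).all (fun p => P p.2 p.1) := by
  rw [Bool.eq_iff_iff]
  simp only [List.all_eq_true, PySem.List.mem_pyRange_one]
  constructor
  · rintro h ⟨a, b⟩ hp
    obtain ⟨k, hk, hget⟩ := List.mem_iff_getElem.mp hp
    have hklen : k + 1 < cs.length := by
      simp [List.length_zip, List.length_tail] at hk; omega
    have hget' : (a, b) = (cs[k], cs[k + 1]) := by
      rw [← hget]; simp [List.getElem_zip, List.getElem_tail]
    rw [Prod.mk.injEq] at hget'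
    obtain ⟨ha, hb⟩ := hget'; subst ha; subst hb
    have := h (((k + 1 : Nat)) : Int) ⟨by omega, by omega⟩
    rw [PySem.List.pyGetD_natCast,
        show (((k + 1 : Nat) : Int)) - 1 = ((k : Nat) : Int) by push_cast; ring,
        PySem.List.pyGetD_natCast,
        List.getD_eq_getElem _ _ hklen, List.getD_eq_getElem _ _ (by omega)] at this
    simpa using this
  · intro h i hi
    obtain ⟨hi1, hi2⟩ := hi
    set k := i.toNat - 1 with hkdef
    have hklen : k + 1 < cs.length := by omega
    have hmem : (cs[k], cs[k + 1]) ∈ cs.zip cs.tail := by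
      have hz : k < (cs.zip cs.tail).length := by
        simp [List.length_zip, List.length_tail]; omega
      have hzget : (cs.zip cs.tail)[k] = (cs[k], cs[k + 1]) := by
        simp [List.getElem_zip, List.getElem_tail]
      rw [← hzget]; exact List.getElem_mem hz
    have e1 : i = (((k + 1 : Nat)) : Int) := by omega
    rw [e1, PySem.List.pyGetD_natCast,
        show (((k + 1 : Nat) : Int)) - 1 = ((k : Nat) : Int) by push_cast; ring,
        PySem.List.pyGetD_natCast,
        List.getD_eq_getElem _ _ hklen, List.getD_eq_getElem _ _ (by omega)]
    simpa using h _ hmem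

-- the two specialisations rewritten in the verdict proof (beta-reduced statements)
theorem pv_asc_eq_zip (cs : List Char) :
    ((PySem.List.pyRange 1 (cs.length : Int) 1).all (fun i =>
      pvDigitInt (PySem.List.pyGetD cs i ' ') == pvDigitInt (PySem.List.pyGetD cs (i - 1) ' ') + 1)) =
    (cs.zip cs.tail).all (fun p => pvDigitInt p.2 == pvDigitInt p.1 + 1) :=
  pv_all_range_eq_zip cs (fun a b => pvDigitInt a == pvDigitInt b + 1)

theorem pv_desc_eq_zip (cs : List Char) :
    ((PySem.List.pyRange 1 (cs.length : Int) 1).all (fun i =>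
      pvDigitInt (PySem.List.pyGetD cs i ' ') == pvDigitInt (PySem.List.pyGetD cs (i - 1) ' ') - 1)) =
    (cs.zip cs.tail).all (fun p => pvDigitInt p.2 == pvDigitInt p.1 - 1) :=
  pv_all_range_eq_zip cs (fun a b => pvDigitInt a == pvDigitInt b - 1)

set_option maxRecDepth 4096 in
theorem pv_toList_asc : ("0123456789" : String).toList = pvMasterAsc := by decide

set_option maxRecDepth 4096 in
theorem pv_toList_desc : ("9876543210" : String).toList = pvMasterDesc := by decide

-- a zip pair of cs is exactly a pair of adjacent elements
theorem pv_zip_pair_mem (cs : List Char) (k : Nat) (h : k + 1 < cs.length) :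
    (cs[k], cs[k + 1]) ∈ cs.zip cs.tail := by
  have hz : k < (cs.zip cs.tail).length := by
    simp [List.length_zip, List.length_tail]; omega
  have hzget : (cs.zip cs.tail)[k] = (cs[k], cs[k + 1]) := by
    simp [List.getElem_zip, List.getElem_tail]
  rw [← hzget]; exact List.getElem_mem hz

theorem pv_zip_pair_elim {cs : List Char} {p : Char × Char} (hp : p ∈ cs.zip cs.tail) :
    ∃ (k : Nat) (h : k + 1 < cs.length), p = (cs[k], cs[k + 1]) := by
  obtain ⟨k, hk, hget⟩ := List.mem_iff_getElem.mp hp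
  have hklen : k + 1 < cs.length := by
    simp [List.length_zip, List.length_tail] at hk; omega
  refine ⟨k, hklen, ?_⟩
  rw [← hget]; simp [List.getElem_zip, List.getElem_tail]

-- chain step extraction: the zip-all gives the adjacent-code relation
theorem pv_asc_step {cs : List Char}
    (h : (cs.zip cs.tail).all (fun p => pvDigitInt p.2 == pvDigitInt p.1 + 1) = true)
    (k : Nat) (hk : k + 1 < cs.length) : cs[k + 1].toNat = cs[k].toNat + 1 := by
  have := List.all_eq_true.mp h _ (pv_zip_pair_mem cs k hk)
  simp only [beq_iff_eq, pvDigitInt] at this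
  omega

theorem pv_desc_step {cs : List Char}
    (h : (cs.zip cs.tail).all (fun p => pvDigitInt p.2 == pvDigitInt p.1 - 1) = true)
    (k : Nat) (hk : k + 1 < cs.length) : cs[k].toNat = cs[k + 1].toNat + 1 := by
  have := List.all_eq_true.mp h _ (pv_zip_pair_mem cs k hk)
  simp only [beq_iff_eq, pvDigitInt] at this
  omega

-- ascending chain over digit characters ↔ contiguous substring of "0123456789"
theorem pv_chain_asc_iff (cs : List Char) (hd : ∀ c ∈ cs, 48 ≤ c.toNat ∧ c.toNat ≤ 57) :
    ((cs.zip cs.tail).all (fun p => pvDigitInt p.2 == pvDigitInt p.1 + 1) = true) ↔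
      cs <:+: pvMasterAsc := by
  constructor
  · intro h
    by_cases hnil : cs = []
    · subst hnil; exact List.nil_infix
    have hpos : 0 < cs.length := List.length_pos_of_ne_nil hnil
    have hidx : ∀ i (hi : i < cs.length), (cs[i]'hi).toNat = (cs[0]'hpos).toNat + i := by
      intro i
      induction i with
      | zero => intro hi; simp
      | succ k ih =>
        intro hi
        rw [pv_asc_step h k hi, ih (by omega)]; omega
    have h0 := hd (cs[0]'hpos) (List.getElem_mem hpos)
    have hlastb : (cs[0]'hpos).toNat + (cs.length - 1) ≤ 57 := by
      have hl : cs.length - 1 < cs.length := by omega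
      have := hd (cs[cs.length - 1]'hl) (List.getElem_mem hl)
      have := hidx (cs.length - 1) hl
      omega
    set j := (cs[0]'hpos).toNat - 48 with hj
    have hjlen : j + cs.length ≤ 10 := by omega
    have heq : cs = (pvMasterAsc.drop j).take cs.length := by
      apply List.ext_getElem
      · simp [pvMasterAsc]; omega
      · intro i h1 h2
        rw [List.getElem_take, List.getElem_drop]
        apply pvChar_eq_of_toNat
        rw [hidx i h1, pvMasterAsc_get (j + i) (by simp [pvMasterAsc]; omega)]
        omega
    rw [heq]
    exact ((List.take_prefix _ _).isInfix.trans (List.drop_suffix _ _).isInfix)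
  · intro hinf
    obtain ⟨s, t, hst⟩ := hinf
    have hlen : s.length + cs.length + t.length = 10 := by
      have := congrArg List.length hst
      simp [pvMasterAsc] at this; omega
    have hat : ∀ i (hi : i < cs.length), (cs[i]'hi).toNat = 48 + (s.length + i) := by
      intro i hi
      have hbig : s.length + i < pvMasterAsc.length := by simp [pvMasterAsc]; omega
      have e : pvMasterAsc[s.length + i]? = some (cs[i]'hi) := by
        rw [← hst, List.append_assoc, List.getElem?_append_right (by omega)]
        rw [Nat.add_sub_cancel_left, List.getElem?_append_left hi]
        exact List.getElem?_eq_getElem hi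
      rw [List.getElem?_eq_getElem hbig] at e
      rw [← Option.some.inj e, pvMasterAsc_get]
    rw [List.all_eq_true]
    intro p hp
    obtain ⟨k, hk, rfl⟩ := pv_zip_pair_elim hp
    have h1 := hat k (by omega)
    have h2 := hat (k + 1) hk
    simp only [beq_iff_eq, pvDigitInt]
    omega

-- descending chain over digit characters ↔ contiguous substring of "9876543210"
theorem pv_chain_desc_iff (cs : List Char) (hd : ∀ c ∈ cs, 48 ≤ c.toNat ∧ c.toNat ≤ 57) :
    ((cs.zip cs.tail).all (fun p => pvDigitInt p.2 == pvDigitInt p.1 - 1) = true) ↔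
      cs <:+: pvMasterDesc := by
  constructor
  · intro h
    by_cases hnil : cs = []
    · subst hnil; exact List.nil_infix
    have hpos : 0 < cs.length := List.length_pos_of_ne_nil hnil
    have hidx : ∀ i (hi : i < cs.length), (cs[i]'hi).toNat + i = (cs[0]'hpos).toNat := by
      intro i
      induction i with
      | zero => intro hi; simp
      | succ k ih =>
        intro hi
        have := pv_desc_step h k hi
        have := ih (by omega)
        omega
    have h0 := hd (cs[0]'hpos) (List.getElem_mem hpos)
    have hlastb : 48 + (cs.length - 1) ≤ (cs[0]'hpos).toNat := by
      have hl : cs.length - 1 < cs.length := by omega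
      have := hd (cs[cs.length - 1]'hl) (List.getElem_mem hl)
      have := hidx (cs.length - 1) hl
      omega
    set j := 57 - (cs[0]'hpos).toNat with hj
    have hjlen : j + cs.length ≤ 10 := by omega
    have heq : cs = (pvMasterDesc.drop j).take cs.length := by
      apply List.ext_getElem
      · simp [pvMasterDesc]; omega
      · intro i h1 h2
        rw [List.getElem_take, List.getElem_drop]
        apply pvChar_eq_of_toNat
        have := hidx i h1
        rw [pvMasterDesc_get (j + i) (by simp [pvMasterDesc]; omega)]
        omega
    rw [heq]
    exact ((List.take_prefix _ _).isInfix.trans (List.drop_suffix _ _).isInfix)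
  · intro hinf
    obtain ⟨s, t, hst⟩ := hinf
    have hlen : s.length + cs.length + t.length = 10 := by
      have := congrArg List.length hst
      simp [pvMasterDesc] at this; omega
    have hat : ∀ i (hi : i < cs.length), (cs[i]'hi).toNat = 57 - (s.length + i) := by
      intro i hi
      have hbig : s.length + i < pvMasterDesc.length := by simp [pvMasterDesc]; omega
      have e : pvMasterDesc[s.length + i]? = some (cs[i]'hi) := by
        rw [← hst, List.append_assoc, List.getElem?_append_right (by omega)]
        rw [Nat.add_sub_cancel_left, List.getElem?_append_left hi]
        exact List.getElem?_eq_getElem hi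
      rw [List.getElem?_eq_getElem hbig] at e
      rw [← Option.some.inj e, pvMasterDesc_get]
    rw [List.all_eq_true]
    intro p hp
    obtain ⟨k, hk, rfl⟩ := pv_zip_pair_elim hp
    have h1 := hat k (by omega)
    have h2 := hat (k + 1) hk
    have hs : s.length + (k + 1) ≤ 9 := by omega
    simp only [beq_iff_eq, pvDigitInt]
    omega

-- a failing adjacent pair inside the digit prefix falsifies the corresponding zip-all of cs
theorem pv_prefix_fail_all_false (cs : List Char) (Q : Char → Char → Bool)
    (h : ((cs.takeWhile pvIsDigit).zip (cs.takeWhile pvIsDigit).tail).any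
          (fun p => !(Q p.1 p.2)) = true) :
    (cs.zip cs.tail).all (fun p => Q p.1 p.2) = false := by
  obtain ⟨p, hp, hq⟩ := List.any_eq_true.mp h
  obtain ⟨k, hk, rfl⟩ := pv_zip_pair_elim hp
  set pre := cs.takeWhile pvIsDigit with hpre
  have hprefix : pre <+: cs := List.takeWhile_prefix _
  have hlenle : pre.length ≤ cs.length := hprefix.length_le
  have e1 : pre[k] = cs[k]'(by omega) := hprefix.getElem (by omega)
  have e2 : pre[k + 1] = cs[k + 1]'(by omega) := hprefix.getElem hk
  apply List.all_eq_false.mpr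
  refine ⟨(cs[k]'(by omega), cs[k + 1]'(by omega)), pv_zip_pair_mem cs k (by omega), ?_⟩
  rw [← e1, ← e2]
  simpa using hq

-- all characters of an infix of a master string are digit characters
theorem pv_infix_master_digits {cs m : List Char} (hm : ∀ c ∈ m, 48 ≤ c.toNat ∧ c.toNat ≤ 57)
    (h : cs <:+: m) : ∀ c ∈ cs, 48 ≤ c.toNat ∧ c.toNat ≤ 57 :=
  fun c hc => hm c (h.mem hc)

theorem pvMasterAsc_digits : ∀ c ∈ pvMasterAsc, 48 ≤ c.toNat ∧ c.toNat ≤ 57 := by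
  intro c hc; fin_cases hc <;> exact ⟨by decide, by decide⟩

theorem pvMasterDesc_digits : ∀ c ∈ pvMasterDesc, 48 ≤ c.toNat ∧ c.toNat ≤ 57 := by
  intro c hc; fin_cases hc <;> exact ⟨by decide, by decide⟩

-- ===== VERDICT (by name: the statements are the Claim_ definitions above) =====
theorem is_sequential_py_spec : Claim_equal_is_sequential_py := by
  intro s _ hpre
  unfold Spec_is_sequential_py is_sequential_py is_sequential_py_alt
  by_cases hpat : s ∈ (["1234567890", "0987654321", "0123456789", "9876543210",
     "1111111111", "2222222222", "3333333333", "4444444444", "5555555555",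
     "6666666666", "7777777777", "8888888888", "9999999999"] : List String)
  · simp [hpat]
  · by_cases hone : (PySem.Set.ofList s.toList).length = 1
    · simp [hpat, hone]
    · simp only [List.contains_eq_mem, hpat, hone, decide_false, Bool.false_or,
        Bool.false_eq_true, if_false, beq_iff_eq]
      rw [pv_asc_eq_zip, pv_desc_eq_zip]
      have hone'' : (List.length (PySem.Set.ofList s.toList) == 1) = false := by
        simpa using hone
      rw [hone'', Bool.false_or]
      have hAsc := pv_toList_asc
      have hDesc := pv_toList_desc
      rcases hpre with hdig | hone' | ⟨hafail, hdfail⟩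
      · -- all-digit string: chain ↔ substring, for each direction
        have hd : ∀ c ∈ s.toList, 48 ≤ c.toNat ∧ c.toNat ≤ 57 := by
          intro c hc
          have := List.all_eq_true.mp hdig c hc
          simp only [pvIsDigit, Bool.and_eq_true, decide_eq_true_eq] at this
          exact this
        have e1 : ((s.toList.zip s.toList.tail).all
            (fun p => pvDigitInt p.2 == pvDigitInt p.1 + 1)) = PySem.Str.isIn s "0123456789" := by
          rw [Bool.eq_iff_iff, pv_chain_asc_iff s.toList hd, PySem.Str.isIn_iff_infix, hAsc]
        have e2 : ((s.toList.zip s.toList.tail).all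
            (fun p => pvDigitInt p.2 == pvDigitInt p.1 - 1)) = PySem.Str.isIn s "9876543210" := by
          rw [Bool.eq_iff_iff, pv_chain_desc_iff s.toList hd, PySem.Str.isIn_iff_infix, hDesc]
        rw [e1, e2]
      · exact absurd hone' hone
      · -- both scans fail inside the digit prefix: everything is false
        have hascf : (s.toList.zip s.toList.tail).all
            (fun p => pvDigitInt p.2 == pvDigitInt p.1 + 1) = false := by
          have := pv_prefix_fail_all_false s.toList
            (fun a b => pvDigitInt b == pvDigitInt a + 1) (by
              apply List.any_eq_true.mpr
              obtain ⟨p, hp, hq⟩ := List.any_eq_true.mp hafail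
              refine ⟨p, hp, ?_⟩
              simp only [Bool.not_eq_true', beq_eq_false_iff_ne, ne_eq,
                pvDigitInt] at hq ⊢
              omega)
          simpa using this
        have hdescf : (s.toList.zip s.toList.tail).all
            (fun p => pvDigitInt p.2 == pvDigitInt p.1 - 1) = false := by
          have := pv_prefix_fail_all_false s.toList
            (fun a b => pvDigitInt b == pvDigitInt a - 1) (by
              apply List.any_eq_true.mpr
              obtain ⟨p, hp, hq⟩ := List.any_eq_true.mp hdfail
              refine ⟨p, hp, ?_⟩
              simp only [Bool.not_eq_true', beq_eq_false_iff_ne, ne_eq,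
                pvDigitInt] at hq ⊢
              omega)
          simpa using this
        have hinA : PySem.Str.isIn s "0123456789" = false := by
          cases hA : PySem.Str.isIn s "0123456789"
          · rfl
          · exfalso
            have hinf := (PySem.Str.isIn_iff_infix _ _).mp hA
            rw [hAsc] at hinf
            have hd := pv_infix_master_digits pvMasterAsc_digits hinf
            have := (pv_chain_asc_iff s.toList hd).mpr hinf
            rw [this] at hascf; simp at hascf
        have hinD : PySem.Str.isIn s "9876543210" = false := by
          cases hD : PySem.Str.isIn s "9876543210"
          · rfl
          · exfalso
            have hinf := (PySem.Str.isIn_iff_infix _ _).mp hD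
            rw [hDesc] at hinf
            have hd := pv_infix_master_digits pvMasterDesc_digits hinf
            have := (pv_chain_desc_iff s.toList hd).mpr hinf
            rw [this] at hdescf; simp at hdescf
        rw [hascf, hdescf, hinA, hinD]
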